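-- pv_equiv track=rewrite | github.com/sammwaughh/ArtContext | All Scripts/Dataset/select_paragraph.py | build_context_sentences
-- ===== SOURCE A (Python) =====
-- def build_context_sentences(sentences):
--     """
--     For each sentence, create a 3-sentence context string by concatenating:
--     the previous sentence, the current sentence, and the next sentence (if available),
--     using " ||| " as a delimiter.
--     """
--     candidate_contexts = []
--     for i, sentence in enumerate(sentences):
--         context = []
--         if i > 0:
--             context.append(sentences[i-1])
--         context.append(sentence)
--         if i < len(sentences) - 1:
--             context.append(sentences[i+1])
--         candidate_contexts.append(" ||| ".join(context))
--     return candidate_contexts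
-- ===== SOURCE B (Python) =====
-- def build_context_sentences(sentences):
--     n = len(sentences)
--     if n == 0:
--         return []
--     if n == 1:
--         return [sentences[0]]
--     middle = [a + " ||| " + b + " ||| " + c
--               for a, b, c in zip(sentences, sentences[1:], sentences[2:])]
--     return ([sentences[0] + " ||| " + sentences[1]]
--             + middle
--             + [sentences[-2] + " ||| " + sentences[-1]])
-- ===== Notes on version B (the rewrite author's own statement) =====
-- stated objective: alternative
-- what changed: Instead of A's single loop that builds each context with two boundary conditionals and neighbour indexing, B builds the interior contexts by zipping the list with its two shifted copies (zip(sentences, sentences[1:], sentences[2:])) and concatenates explicit first and last edge contexts around them.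
import Mathlib
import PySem

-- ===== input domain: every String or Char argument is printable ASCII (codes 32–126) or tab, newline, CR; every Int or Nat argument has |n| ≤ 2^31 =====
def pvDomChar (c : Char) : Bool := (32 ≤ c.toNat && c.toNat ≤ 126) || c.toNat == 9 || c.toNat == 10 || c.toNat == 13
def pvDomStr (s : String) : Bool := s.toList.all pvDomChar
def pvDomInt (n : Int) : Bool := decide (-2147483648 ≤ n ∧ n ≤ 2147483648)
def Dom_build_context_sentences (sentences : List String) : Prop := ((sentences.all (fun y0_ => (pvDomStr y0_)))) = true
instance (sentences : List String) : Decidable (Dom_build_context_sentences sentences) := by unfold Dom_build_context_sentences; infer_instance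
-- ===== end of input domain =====

-- B replaces A's per-index conditional window building with a zip of the list against its
-- two shifted copies for the interior plus explicit first/last edge strings (objective: alternative).

-- ===== PORT A =====
-- Python A: for i, sentence in enumerate(sentences): build context with two boundary
-- conditionals (prev if i > 0, next if i < len-1), join with " ||| ", append.
def build_context_sentences (sentences : List String) : List String :=
  (PySem.List.enumerate sentences).foldl (fun candidate_contexts p =>
    candidate_contexts ++
      [PySem.Str.join " ||| "
        ((if p.1 > 0 then [PySem.List.pyGetD sentences (p.1 - 1) ""] else []) ++
         [p.2] ++
         (if p.1 < (sentences.length : Int) - 1 then [PySem.List.pyGetD sentences (p.1 + 1) ""] else []))]) []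

-- ===== PORT B =====
-- Python B: interior contexts from zip(sentences, sentences[1:], sentences[2:]);
-- first and last contexts built explicitly; the three pieces concatenated.
def build_context_sentences_alt (sentences : List String) : List String :=
  if sentences.length = 0 then []
  else if sentences.length = 1 then [PySem.List.pyGetD sentences 0 ""]
  else
    let middle :=
      (sentences.zip ((PySem.List.slice sentences (some 1) none).zip
                      (PySem.List.slice sentences (some 2) none))).map
        (fun p => p.1 ++ " ||| " ++ p.2.1 ++ " ||| " ++ p.2.2)
    [PySem.List.pyGetD sentences 0 "" ++ " ||| " ++ PySem.List.pyGetD sentences 1 ""]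
      ++ middle
      ++ [PySem.List.pyGetD sentences (-2) "" ++ " ||| " ++ PySem.List.pyGetD sentences (-1) ""]

-- ===== PRECONDITION & SPEC =====
def Spec_build_context_sentences (sentences : List String) (out : List String) : Prop := out = build_context_sentences_alt sentences
instance (sentences : List String) (out : List String) : Decidable (Spec_build_context_sentences sentences out) := by unfold Spec_build_context_sentences; infer_instance

-- ===== CLAIM (what is proved, stated in full; the proofs are below) =====
def Claim_equal_build_context_sentences : Prop := ∀ (sentences : List String), Dom_build_context_sentences sentences → Spec_build_context_sentences sentences (build_context_sentences sentences)

-- ===== LEMMAS AND PROOFS =====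

-- " ||| ".join on one-, two- and three-element lists, as string concatenation.
theorem join1 (a : String) : PySem.Str.join " ||| " [a] = a := by
  simp [PySem.Str.join, PySem.Chars.join_singleton]

theorem join_cons (sep a b : String) (rest : List String) :
    PySem.Str.join sep (a :: b :: rest) = a ++ sep ++ PySem.Str.join sep (b :: rest) := by
  simp [PySem.Str.join, PySem.Chars.join_cons_cons, String.ofList_append,
    String.ofList_toList, String.append_assoc]

theorem join2 (a b : String) : PySem.Str.join " ||| " [a, b] = a ++ " ||| " ++ b := by
  rw [join_cons, join1]

theorem join3 (a b c : String) :
    PySem.Str.join " ||| " [a, b, c] = a ++ " ||| " ++ b ++ " ||| " ++ c := by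
  rw [join_cons, join_cons, join1]
  simp [String.append_assoc]

-- Python's negative indexing, evaluated for the two indices B uses.
theorem pyGetD_neg_one (xs : List String) (h : 1 ≤ xs.length) :
    PySem.List.pyGetD xs (-1) "" = xs.getD (xs.length - 1) "" := by
  simp only [PySem.List.pyGetD, PySem.List.pyGet?, PySem.List.pyIdx?]
  rw [if_neg (by norm_num), if_pos (by omega)]
  simp only [Option.bind_some, show ((- -1 : Int)).toNat = 1 from rfl, List.getD]

theorem pyGetD_neg_two (xs : List String) (h : 2 ≤ xs.length) :
    PySem.List.pyGetD xs (-2) "" = xs.getD (xs.length - 2) "" := by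
  simp only [PySem.List.pyGetD, PySem.List.pyGet?, PySem.List.pyIdx?]
  rw [if_neg (by norm_num), if_pos (by omega)]
  simp only [Option.bind_some, show ((- -2 : Int)).toNat = 2 from rfl, List.getD]

theorem pyGetD_nat (xs : List String) (k : Nat) (hk : k < xs.length) :
    PySem.List.pyGetD xs (k : Int) "" = xs[k] := by
  rw [PySem.List.pyGetD_natCast]
  exact List.getD_eq_getElem _ _ hk

-- ===== VERDICT (by name: the statement is the Claim_ definition above) =====
theorem build_context_sentences_spec : Claim_equal_build_context_sentences := by
  intro xs _
  unfold Spec_build_context_sentences build_context_sentences build_context_sentences_alt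
  rw [PySem.List.foldl_append_singleton_eq_map, PySem.List.enumerate_eq_map_pyRange (d := ""),
    List.map_map, List.nil_append]
  rw [show PySem.List.len xs = ((xs.length : Nat) : Int) from rfl,
    PySem.List.pyRange_zero_natCast, List.map_map]
  match xs with
  | [] => rfl
  | [a] =>
    simp only [List.length_singleton]
    norm_num [List.range, List.range.loop, Function.comp]
    rw [join1]
  | a :: b :: t =>
    set ys := a :: b :: t with hys
    have hn : 2 ≤ ys.length := by simp [hys]
    have hslice1 : PySem.List.slice ys (some 1) none = ys.drop 1 := by
      rw [PySem.List.slice_from ys (by norm_num : (0:Int) ≤ 1)]; rfl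
    have hslice2 : PySem.List.slice ys (some 2) none = ys.drop 2 := by
      rw [PySem.List.slice_from ys (by norm_num : (0:Int) ≤ 2)]; rfl
    rw [if_neg (by omega), if_neg (by omega)]
    apply List.ext_getElem
    · simp [hslice1, hslice2]
      omega
    · intro i h1 h2
      have hi : i < ys.length := by simpa using h1
      simp only [List.getElem_map, List.getElem_range, Function.comp_apply]
      simp only [List.nil_append, List.cons_append]
      by_cases hi0 : i = 0
      · subst hi0
        rw [if_neg (by norm_num), if_pos (by push_cast; omega)]
        simp only [List.nil_append, List.cons_append]
        rw [join2]
        norm_num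
      · by_cases hil : i = ys.length - 1
        · -- last index
          obtain ⟨j, rfl⟩ : ∃ j, i = j + 1 := ⟨i - 1, by omega⟩
          rw [if_pos (by push_cast; omega), if_neg (by push_cast; omega)]
          simp only [List.append_nil, List.cons_append, List.nil_append]
          rw [join2]
          have c1 : (((j + 1 : Nat) : Int) - 1) = ((j : Nat) : Int) := by push_cast; omega
          rw [c1, pyGetD_nat ys j (by omega), pyGetD_nat ys (j+1) hi]
          conv_rhs => rw [List.getElem_cons_succ]
          rw [List.getElem_append_right (by simp [hslice1, hslice2]; omega)]
          simp only [List.getElem_singleton]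
          rw [pyGetD_neg_one ys (by omega), pyGetD_neg_two ys (by omega),
            show ys.length - 2 = j by omega, show ys.length - 1 = j + 1 by omega,
            List.getD_eq_getElem _ _ (by omega), List.getD_eq_getElem _ _ (by omega)]
        · -- interior index: 0 < i < length - 1
          have hlt : i < ys.length - 1 := by omega
          obtain ⟨j, rfl⟩ : ∃ j, i = j + 1 := ⟨i - 1, by omega⟩
          rw [if_pos (by push_cast; omega), if_pos (by push_cast; omega)]
          simp only [List.cons_append, List.nil_append]
          rw [join3]
          have c1 : (((j + 1 : Nat) : Int) - 1) = ((j : Nat) : Int) := by push_cast; omega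
          have c2 : (((j + 1 : Nat) : Int)) = ((1 + j : Nat) : Int) := by push_cast; omega
          have c3 : (((j + 1 : Nat) : Int) + 1) = ((2 + j : Nat) : Int) := by push_cast; omega
          rw [c1, c3, c2, pyGetD_nat ys j (by omega), pyGetD_nat ys (1+j) (by omega),
            pyGetD_nat ys (2+j) (by omega)]
          rw [List.getElem_cons_succ]
          rw [List.getElem_append_left (by simp [hslice1, hslice2]; omega)]
          simp only [List.getElem_map, List.getElem_zip, hslice1, hslice2,
            List.getElem_drop]
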